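-- pv_equiv track=rewrite | github.com/HidenLee/BaekjoonHub | 백준/Platinum/1799. 비숍/비숍.py | backtrack
-- ===== SOURCE A (Python) =====
-- def backtrack(arr):
--     max_cnt = 0
--     stack = [(0,0,set(),set())]
--
--     while stack:
--         idx, cnt, NE, SE = stack.pop() # North-east mean  "/" whiie South-east mean "\"
--
--         if idx == len(arr):
--             max_cnt = max(max_cnt,cnt)
--             continue
--         temp = (arr[idx][0] + arr[idx][1], arr[idx][0] - arr[idx][1])
--         if temp[0] not in NE and temp[1] not in SE:
--             new_NE = NE.copy()
--             new_SE = SE.copy()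
--             new_NE.add(temp[0])
--             new_SE.add(temp[1])
--             stack.append((idx + 1, cnt + 1, new_NE, new_SE))
--
--         stack.append((idx+1,cnt,NE,SE))
--
--     return max_cnt
-- ===== SOURCE B (Python) =====
-- def backtrack(arr):
--     # Recursive divide: best count for the remaining cells given occupied diagonals,
--     # combining include/exclude branches with max (A uses an explicit stack + global max).
--     def go(cells, ne, se):
--         if not cells:
--             return 0
--         r, c = cells[0]
--         best = go(cells[1:], ne, se)
--         if (r + c) not in ne and (r - c) not in se:
--             best = max(best, go(cells[1:], ne | {r + c}, se | {r - c}) + 1)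
--         return best
--     return go(arr, frozenset(), frozenset())
-- ===== Notes on version B (the rewrite author's own statement) =====
-- stated objective: alternative
-- what changed: Replaced the explicit-stack state machine with a global max accumulator by a direct structural recursion on the cell list that returns the best count of each subproblem and combines the include/exclude branches with max.
import Mathlib
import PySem

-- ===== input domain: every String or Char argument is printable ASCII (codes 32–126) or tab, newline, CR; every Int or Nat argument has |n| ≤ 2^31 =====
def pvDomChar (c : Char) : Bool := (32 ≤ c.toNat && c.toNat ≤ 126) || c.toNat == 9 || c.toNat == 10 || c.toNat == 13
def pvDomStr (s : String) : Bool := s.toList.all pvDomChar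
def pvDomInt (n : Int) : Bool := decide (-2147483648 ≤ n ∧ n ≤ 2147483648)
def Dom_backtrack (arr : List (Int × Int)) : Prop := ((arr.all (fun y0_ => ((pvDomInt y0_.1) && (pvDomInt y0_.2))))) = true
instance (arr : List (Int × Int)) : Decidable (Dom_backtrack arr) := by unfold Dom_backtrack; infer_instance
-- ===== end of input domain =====

-- B replaces A's explicit-stack search with a direct structural recursion that returns and max-combines branch results (alternative decomposition, same exponential cost).


-- ===== PORT A =====
-- A's while-loop over a LIFO stack of states (idx, cnt, NE, SE); the stack is kept
-- top-first (Python appends/pops at the right end; value-equivalent).  The hypothesis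
-- `h` (every stacked idx is in range) is an invariant of A's loop, carried only so the
-- index access `arr[idx]` and the termination measure are well-defined.
def pvMeasure (n : Nat) (stack : List (Nat × Int × PySem.Set Int × PySem.Set Int)) : Nat :=
  (stack.map (fun s => 3 ^ (n + 1 - s.1))).sum

lemma pvPowStep {n idx : Nat} (h : idx < n) : 2 * 3 ^ (n - idx) < 3 ^ (n + 1 - idx) := by
  have he : n + 1 - idx = (n - idx) + 1 := by omega
  rw [he, pow_succ]
  have hp : 0 < 3 ^ (n - idx) := pow_pos (by norm_num) _
  omega

def backtrackAux (arr : List (Int × Int))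
    (stack : List (Nat × Int × PySem.Set Int × PySem.Set Int))
    (h : ∀ s ∈ stack, s.1 ≤ arr.length) (maxCnt : Int) : Int :=
  match stack with
  | [] => maxCnt
  | (idx, cnt, NE, SE) :: rest =>
    if hidx : idx = arr.length then
      backtrackAux arr rest (fun s hs => h s (List.mem_cons_of_mem _ hs)) (max maxCnt cnt)
    else
      have hlt : idx < arr.length :=
        lt_of_le_of_ne (h _ (List.mem_cons_self)) hidx
      let p := arr[idx]'hlt
      let t1 := p.1 + p.2
      let t2 := p.1 - p.2
      if t1 ∉ NE ∧ t2 ∉ SE then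
        backtrackAux arr
          ((idx + 1, cnt, NE, SE) :: (idx + 1, cnt + 1, PySem.Set.add NE t1, PySem.Set.add SE t2) :: rest)
          (by
            intro s hs
            rcases List.mem_cons.mp hs with rfl | hs
            · exact hlt
            rcases List.mem_cons.mp hs with rfl | hs
            · exact hlt
            · exact h s (List.mem_cons_of_mem _ hs))
          maxCnt
      else
        backtrackAux arr ((idx + 1, cnt, NE, SE) :: rest)
          (by
            intro s hs
            rcases List.mem_cons.mp hs with rfl | hs
            · exact hlt
            · exact h s (List.mem_cons_of_mem _ hs))
          maxCnt
  termination_by pvMeasure arr.length stack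
  decreasing_by
  · simp only [pvMeasure, List.map_cons, List.sum_cons]
    have : arr.length + 1 - idx = 1 := by omega
    rw [this]
    omega
  · simp only [pvMeasure, List.map_cons, List.sum_cons]
    have h2 : arr.length + 1 - (idx + 1) = arr.length - idx := by omega
    rw [h2]
    have := pvPowStep hlt
    omega
  · simp only [pvMeasure, List.map_cons, List.sum_cons]
    have h2 : arr.length + 1 - (idx + 1) = arr.length - idx := by omega
    rw [h2]
    have := pvPowStep hlt
    omega

def backtrack (arr : List (Int × Int)) : Int :=
  backtrackAux arr [(0, 0, PySem.Set.empty, PySem.Set.empty)] (by intro s hs; simp_all) 0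

-- ===== PORT B =====
def goAlt : List (Int × Int) → PySem.Set Int → PySem.Set Int → Int
  | [], _, _ => 0
  | (r, c) :: rest, ne, se =>
    let best := goAlt rest ne se
    if (r + c) ∉ ne ∧ (r - c) ∉ se then
      max best (goAlt rest (PySem.Set.add ne (r + c)) (PySem.Set.add se (r - c)) + 1)
    else best

def backtrack_alt (arr : List (Int × Int)) : Int :=
  goAlt arr PySem.Set.empty PySem.Set.empty

-- ===== PRECONDITION & SPEC =====
def Spec_backtrack (arr : List (Int × Int)) (out : Int) : Prop := out = backtrack_alt arr
instance (arr : List (Int × Int)) (out : Int) : Decidable (Spec_backtrack arr out) := by unfold Spec_backtrack; infer_instance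

-- ===== CLAIM (what is proved, stated in full; the proofs are below) =====
def Claim_equal_backtrack : Prop := ∀ (arr : List (Int × Int)), Dom_backtrack arr → Spec_backtrack arr (backtrack arr)

-- ===== LEMMAS AND PROOFS =====
lemma goAlt_nonneg (l : List (Int × Int)) (ne se : PySem.Set Int) : 0 ≤ goAlt l ne se := by
  induction l generalizing ne se with
  | nil => simp [goAlt]
  | cons hd tl ih =>
    obtain ⟨r, c⟩ := hd
    simp only [goAlt]
    split
    · exact le_trans (ih ne se) (le_max_left _ _)
    · exact ih ne se

-- The stack invariant of A's loop: its result is the running max together with,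
-- for each stacked state, cnt plus B's best value for the remaining cells.
lemma backtrackAux_eq (arr : List (Int × Int))
    (stack : List (Nat × Int × PySem.Set Int × PySem.Set Int))
    (h : ∀ s ∈ stack, s.1 ≤ arr.length) (m : Int) :
    backtrackAux arr stack h m =
      stack.foldl (fun acc s => max acc (s.2.1 + goAlt (arr.drop s.1) s.2.2.1 s.2.2.2)) m := by
  fun_induction backtrackAux arr stack h m with
  | case1 => rfl
  | case2 m cnt NE SE rest h1 h2 ih =>
    rw [ih]
    simp [List.drop_length, goAlt]
  | case3 m idx cnt NE SE rest h3 hne hlt p t1 t2 hcond h ih =>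
    rw [ih]
    simp only [List.foldl_cons]
    rw [List.drop_eq_getElem_cons hlt]
    have hg : goAlt (arr[idx] :: arr.drop (idx + 1)) NE SE =
        max (goAlt (arr.drop (idx + 1)) NE SE)
          (goAlt (arr.drop (idx + 1)) (PySem.Set.add NE t1) (PySem.Set.add SE t2) + 1) := by
      simp only [goAlt, List.get_eq_getElem]
      exact if_pos hcond
    rw [hg]
    congr 1
    omega
  | case4 m idx cnt NE SE rest h3 hne hlt p t1 t2 hcond h ih =>
    rw [ih]
    simp only [List.foldl_cons]
    rw [List.drop_eq_getElem_cons hlt]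
    have hg : goAlt (arr[idx] :: arr.drop (idx + 1)) NE SE = goAlt (arr.drop (idx + 1)) NE SE := by
      simp only [goAlt, List.get_eq_getElem]
      exact if_neg hcond
    rw [hg]

-- ===== VERDICT (by name: the statement is the Claim_ definition above) =====
theorem backtrack_spec : Claim_equal_backtrack := by
  intro arr _
  unfold Spec_backtrack backtrack backtrack_alt
  rw [backtrackAux_eq]
  simp only [List.foldl_cons, List.foldl_nil, List.drop_zero, zero_add]
  exact max_eq_right (goAlt_nonneg _ _ _)
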